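-- pv_equiv track=rewrite | github.com/celpegor216/ps | 프로그래머스/unrated/181880. 1로 만들기/1로 만들기.py | solution
-- ===== SOURCE A (Python) =====
-- def solution(num_list):
--     answer = 0
--
--     for item in num_list:
--         while item > 1:
--             if item % 2:
--                 item -= 1
--             item //= 2
--             answer += 1
--
--     return answer
-- ===== SOURCE B (Python) =====
-- def solution(num_list):
--     return sum(item.bit_length() - 1 for item in num_list if item > 1)
-- ===== Notes on version B (the rewrite author's own statement) =====
-- stated objective: faster
-- what changed: Replaces the per-item halving loop with a closed form: each item > 1 needs exactly bit_length(item)-1 halvings, summed in one pass.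
import Mathlib
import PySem

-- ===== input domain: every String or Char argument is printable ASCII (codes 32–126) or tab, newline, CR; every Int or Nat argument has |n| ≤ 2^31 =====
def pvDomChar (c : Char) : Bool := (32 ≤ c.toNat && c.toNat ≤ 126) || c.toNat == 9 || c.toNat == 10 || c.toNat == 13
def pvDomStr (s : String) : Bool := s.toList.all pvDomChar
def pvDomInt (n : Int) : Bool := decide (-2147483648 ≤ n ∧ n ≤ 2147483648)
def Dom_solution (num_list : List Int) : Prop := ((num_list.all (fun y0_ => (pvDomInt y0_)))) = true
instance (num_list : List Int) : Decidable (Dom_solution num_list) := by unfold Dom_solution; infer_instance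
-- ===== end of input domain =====

-- B replaces A's per-item halving loop with a closed form (bit_length(item)-1 per item > 1), summed in one pass; asymptotically faster.


-- ===== PORT A =====
-- A's inner while loop: halve (after subtracting 1 when odd), counting each iteration.
def solutionWhile (item answer : Int) : Int :=
  if h : 1 < item then
    solutionWhile (PySem.Int.floordiv (if PySem.Int.mod item 2 ≠ 0 then item - 1 else item) 2) (answer + 1)
  else answer
termination_by item.toNat
decreasing_by
  have h2 : (0:Int) < 2 := by omega
  split <;>
  · rw [PySem.Int.floordiv_eq_ediv_of_pos h2]
    omega

def solution (num_list : List Int) : Int :=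
  num_list.foldl (fun answer item => solutionWhile item answer) 0

-- ===== PORT B =====
def solution_alt (num_list : List Int) : Int :=
  (num_list.filter (fun item => 1 < item)).foldl
    (fun acc item => acc + ((PySem.Int.bitLength item : Int) - 1)) 0

-- ===== PRECONDITION & SPEC =====
def Spec_solution (num_list : List Int) (out : Int) : Prop := out = solution_alt num_list
instance (num_list : List Int) (out : Int) : Decidable (Spec_solution num_list out) := by unfold Spec_solution; infer_instance

-- ===== CLAIM (what is proved, stated in full; the proofs are below) =====
def Claim_equal_solution : Prop := ∀ (num_list : List Int), Dom_solution num_list → Spec_solution num_list (solution num_list)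

-- ===== LEMMAS AND PROOFS =====
lemma solutionWhile_eq (item answer : Int) :
    solutionWhile item answer =
      answer + (if 1 < item then ((PySem.Int.bitLength item : Int) - 1) else 0) := by
  induction item, answer using solutionWhile.induct with
  | case1 item answer h ih =>
    rw [solutionWhile, dif_pos h]
    simp only [dite_eq_ite] at ih
    rw [ih]
    have h2 : (0:Int) < 2 := by omega
    have hnext : PySem.Int.floordiv (if PySem.Int.mod item 2 ≠ 0 then item - 1 else item) 2
        = PySem.Int.floordiv item 2 := by
      rw [PySem.Int.floordiv_eq_ediv_of_pos h2, PySem.Int.floordiv_eq_ediv_of_pos h2,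
          PySem.Int.mod_eq_emod_of_pos h2]
      split
      · omega
      · rfl
    rw [hnext]
    have hb : PySem.Int.bitLength item = PySem.Int.bitLength (PySem.Int.floordiv item 2) + 1 :=
      PySem.Int.bitLength_of_pos (by omega)
    have hfd : (1:Int) ≤ PySem.Int.floordiv item 2 := by
      rw [PySem.Int.floordiv_eq_ediv_of_pos h2]; omega
    by_cases hgt : 1 < PySem.Int.floordiv item 2
    · rw [if_pos hgt, if_pos h, hb]; push_cast; ring
    · have heq : PySem.Int.floordiv item 2 = 1 := by omega
      rw [if_neg hgt, if_pos h, hb, heq]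
      have h1 : PySem.Int.bitLength 1 = 1 := by decide
      rw [h1]; push_cast; ring
  | case2 item answer h =>
    rw [solutionWhile, dif_neg h, if_neg h, add_zero]

lemma foldl_shift (l : List Int) (a : Int) :
    l.foldl (fun answer item => solutionWhile item answer) a =
      a + (l.filter (fun item => 1 < item)).foldl
        (fun acc item => acc + ((PySem.Int.bitLength item : Int) - 1)) 0 := by
  induction l generalizing a with
  | nil => simp
  | cons x xs ih =>
    simp only [List.foldl_cons, List.filter_cons]
    rw [ih, solutionWhile_eq]
    by_cases hx : 1 < x
    · simp only [hx, if_pos, decide_true]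
      rw [List.foldl_cons]
      have : ∀ (ys : List Int) (b c : Int),
          ys.foldl (fun acc item => acc + ((PySem.Int.bitLength item : Int) - 1)) (b + c) =
            b + ys.foldl (fun acc item => acc + ((PySem.Int.bitLength item : Int) - 1)) c := by
        intro ys
        induction ys with
        | nil => intro b c; simp
        | cons y ys ihy => intro b c; simp only [List.foldl_cons]; rw [add_assoc, ihy]
      rw [show ((0:Int) + ((PySem.Int.bitLength x : Int) - 1)) =
            (((PySem.Int.bitLength x : Int) - 1) + 0) by ring, this]
      ring
    · simp only [hx, decide_false]
      simp

-- ===== VERDICT (by name: the statement is the Claim_ definition above) =====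
theorem solution_spec : Claim_equal_solution := by
  intro num_list _
  unfold Spec_solution solution solution_alt
  rw [foldl_shift]
  ring
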